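-- pv_equiv track=rewrite | github.com/ziglang/zig | dotviewer/graphdisplay.py | permute_mods
-- ===== SOURCE A (Python) =====
-- def permute_mods(base, args):
--     if not args:
--         yield base
--         return
--     first, rest = args[0], args[1:]
--     for val in first:
--         for rval in permute_mods(base | val, rest):
--             yield rval
-- ===== SOURCE B (Python) =====
-- def permute_mods(base, args):
--     # Iterative breadth-wise build instead of recursion: fold each value
--     # list over a running list of accumulated OR-values, then yield them.
--     accs = [base]
--     for lst in args:
--         accs = [a | v for a in accs for v in lst]
--     for a in accs:
--         yield a
-- ===== Notes on version B (the rewrite author's own statement) =====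
-- stated objective: idiomatic
-- what changed: Replaced the generator recursion over args with a single iterative left fold that builds the list of accumulated OR-values and then yields it, removing the per-element chain of nested generators.
import Mathlib
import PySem

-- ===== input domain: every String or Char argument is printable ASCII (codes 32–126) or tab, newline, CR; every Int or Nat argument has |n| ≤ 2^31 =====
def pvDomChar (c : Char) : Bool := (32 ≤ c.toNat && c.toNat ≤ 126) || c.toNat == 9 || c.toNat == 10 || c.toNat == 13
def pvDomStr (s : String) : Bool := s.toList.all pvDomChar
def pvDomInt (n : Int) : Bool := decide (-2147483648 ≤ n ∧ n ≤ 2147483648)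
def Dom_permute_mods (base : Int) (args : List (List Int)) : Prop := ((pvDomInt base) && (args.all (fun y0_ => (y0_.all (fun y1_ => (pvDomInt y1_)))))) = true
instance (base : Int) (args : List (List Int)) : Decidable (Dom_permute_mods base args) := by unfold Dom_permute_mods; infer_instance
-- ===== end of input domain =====

-- B replaces A's generator recursion with an iterative left fold over args; objective: idiomatic.


-- ===== PORT A =====
-- recursion on args: empty → yield base; else for val in first, recurse on base | val
def permute_mods (base : Int) (args : List (List Int)) : List Int :=
  match args with
  | [] => [base]
  | first :: rest => first.flatMap (fun val => permute_mods (Int.lor base val) rest)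

-- ===== PORT B =====
-- fold each value list over the running list of accumulated OR-values
def permute_mods_alt (base : Int) (args : List (List Int)) : List Int :=
  args.foldl (fun accs lst => accs.flatMap (fun a => lst.map (fun v => Int.lor a v))) [base]

-- ===== PRECONDITION & SPEC =====
def Spec_permute_mods (base : Int) (args : List (List Int)) (out : List Int) : Prop := out = permute_mods_alt base args
instance (base : Int) (args : List (List Int)) (out : List Int) : Decidable (Spec_permute_mods base args out) := by unfold Spec_permute_mods; infer_instance

-- ===== CLAIM (what is proved, stated in full; the proofs are below) =====
def Claim_equal_permute_mods : Prop := ∀ (base : Int) (args : List (List Int)), Dom_permute_mods base args → Spec_permute_mods base args (permute_mods base args)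

-- ===== LEMMAS AND PROOFS =====
theorem foldl_eq_flatMap_permute (args : List (List Int)) (accs : List Int) :
    args.foldl (fun accs lst => accs.flatMap (fun a => lst.map (fun v => Int.lor a v))) accs
      = accs.flatMap (fun a => permute_mods a args) := by
  induction args generalizing accs with
  | nil => simp [permute_mods]
  | cons first rest ih =>
      rw [List.foldl_cons, ih]
      simp only [permute_mods]
      rw [List.flatMap_assoc]
      simp [List.flatMap_def, Function.comp_def]

-- ===== VERDICT (by name: the statement is the Claim_ definition above) =====
theorem permute_mods_spec : Claim_equal_permute_mods := by
  intro base args _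
  unfold Spec_permute_mods permute_mods_alt
  rw [foldl_eq_flatMap_permute]
  simp
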